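-- pv_equiv track=rewrite | github.com/winther-s0ldier/data-log-cleaning | insights/journey_builder.py | sanitize_mermaid_label
-- ===== SOURCE A (Python) =====
-- def sanitize_mermaid_label(text: str) -> str:
--     replacements = {
--         '"': "'", '[': '(', ']': ')', '{': '(', '}': ')',
--         '<': '', '>': '', '|': '-', '#': '', '&': 'and',
--         ';': '', '\n': ' ', '\r': ''
--     }
--     for old, new in replacements.items():
--         text = text.replace(old, new)
--     if len(text) > 30:
--         text = text[:27] + "..."
--     return text
-- ===== SOURCE B (Python) =====
-- def sanitize_mermaid_label(text: str) -> str: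
--     mapping = {
--         '"': "'", '[': '(', ']': ')', '{': '(', '}': ')',
--         '<': '', '>': '', '|': '-', '#': '', '&': 'and',
--         ';': '', '\n': ' ', '\r': ''
--     }
--     out = []
--     for ch in text:
--         out.append(mapping.get(ch, ch))
--     result = ''.join(out)
--     if len(result) > 30:
--         result = result[:27] + "..."
--     return result
-- ===== Notes on version B (the rewrite author's own statement) =====
-- stated objective: alternative
-- what changed: Replaces 13 sequential full-string str.replace passes by one character-to-replacement table and a single left-to-right pass that appends mapping.get(ch, ch) and joins; same truncation afterward. Single-pass vs 13-pass traversal; not faster in CPython since str.replace runs in C.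
import Mathlib
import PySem

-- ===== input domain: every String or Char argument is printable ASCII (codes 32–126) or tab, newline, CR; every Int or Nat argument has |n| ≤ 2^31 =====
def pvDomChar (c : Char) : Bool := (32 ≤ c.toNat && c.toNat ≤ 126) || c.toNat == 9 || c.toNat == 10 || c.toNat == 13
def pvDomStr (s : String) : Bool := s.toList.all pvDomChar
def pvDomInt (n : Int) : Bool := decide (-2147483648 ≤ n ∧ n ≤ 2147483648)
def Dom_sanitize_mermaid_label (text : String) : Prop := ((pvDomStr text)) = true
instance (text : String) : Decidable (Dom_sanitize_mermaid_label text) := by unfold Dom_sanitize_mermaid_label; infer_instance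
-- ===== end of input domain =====

-- B replaces A's 13 sequential full-string replace passes by one per-character table lookup in a single pass; same truncation.


-- ===== PORT A =====
def sanitize_mermaid_label (text : String) : String :=
  let replacements : PySem.Dict String String :=
    ⟨[("\"", "'"), ("[", "("), ("]", ")"), ("{", "("), ("}", ")"),
      ("<", ""), (">", ""), ("|", "-"), ("#", ""), ("&", "and"),
      (";", ""), ("\n", " "), ("\r", "")]⟩
  let t := replacements.items.foldl (fun t p => PySem.Str.replace t p.1 p.2) text
  if PySem.Str.len t > 30 then
    String.ofList (PySem.Chars.slice t.toList none (some 27) ++ ['.', '.', '.'])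
  else t

-- ===== PORT B =====
def sanitize_mermaid_label_alt (text : String) : String :=
  let mapping : PySem.Dict Char (List Char) :=
    ⟨[('"', ['\'']), ('[', ['(']), (']', [')']), ('{', ['(']), ('}', [')']),
      ('<', []), ('>', []), ('|', ['-']), ('#', []), ('&', ['a','n','d']),
      (';', []), ('\n', [' ']), ('\r', [])]⟩
  let out := text.toList.foldl (fun acc c => acc ++ [mapping.getD c [c]]) []
  let result := PySem.Chars.join [] out
  if PySem.Chars.len result > 30 then
    String.ofList (PySem.Chars.slice result none (some 27) ++ ['.', '.', '.'])
  else String.ofList result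

-- ===== PRECONDITION & SPEC =====
def Spec_sanitize_mermaid_label (text : String) (out : String) : Prop := out = sanitize_mermaid_label_alt text
instance (text : String) (out : String) : Decidable (Spec_sanitize_mermaid_label text out) := by unfold Spec_sanitize_mermaid_label; infer_instance

-- ===== CLAIM (what is proved, stated in full; the proofs are below) =====
def Claim_equal_sanitize_mermaid_label : Prop := ∀ (text : String), Dom_sanitize_mermaid_label text → Spec_sanitize_mermaid_label text (sanitize_mermaid_label text)

-- ===== LEMMAS AND PROOFS =====

-- replace with a single-character pattern is a per-character flatMap
theorem replace_go_single (o : Char) (new : List Char) :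
    ∀ (l : List Char) (fuel : Nat) (acc : List Char), l.length ≤ fuel →
      PySem.Chars.replace.go [o] new fuel l acc
        = acc.reverse ++ l.flatMap (fun c => if c == o then new else [c]) := by
  intro l
  induction l with
  | nil =>
    intro fuel acc _
    cases fuel <;> simp [PySem.Chars.replace.go]
  | cons c t ih =>
    intro fuel acc h
    cases fuel with
    | zero => simp at h
    | succ n =>
      rw [PySem.Chars.replace.go]
      by_cases hc : c = o
      · subst hc
        simp only [List.isPrefixOf, BEq.rfl, Bool.true_and, if_true]
        rw [show List.drop (List.length [c]) (c :: t) = t from rfl,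
            ih n (new.reverse ++ acc) (by simpa using h)]
        simp
      · have h1 : ([o].isPrefixOf (c :: t)) = false := by
          simp [List.isPrefixOf, Ne.symm hc]
        rw [h1]
        simp only [if_false, Bool.false_eq_true]
        rw [ih n (c :: acc) (by simpa using h)]
        simp [hc]

theorem replace_single (o : Char) (new : List Char) (l : List Char) :
    PySem.Chars.replace l [o] new = l.flatMap (fun c => if c == o then new else [c]) := by
  rw [PySem.Chars.replace]
  simp only [List.isEmpty_cons, Bool.false_eq_true, if_false]
  simpa using replace_go_single o new l l.length [] (le_refl _)


-- the per-character function that both programs implement (scan order = dict insertion order)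
def pvF (c : Char) : List Char :=
  if c == '"' then ['\''] else if c == '[' then ['('] else if c == ']' then [')'] else
  if c == '{' then ['('] else if c == '}' then [')'] else if c == '<' then [] else
  if c == '>' then [] else if c == '|' then ['-'] else if c == '#' then [] else
  if c == '&' then ['a','n','d'] else if c == ';' then [] else if c == '\n' then [' '] else
  if c == '\r' then [] else [c]

theorem chain_eq (l : List Char) :
    PySem.Chars.replace (PySem.Chars.replace (PySem.Chars.replace (PySem.Chars.replace
      (PySem.Chars.replace (PySem.Chars.replace (PySem.Chars.replace (PySem.Chars.replace
      (PySem.Chars.replace (PySem.Chars.replace (PySem.Chars.replace (PySem.Chars.replace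
      (PySem.Chars.replace l ['"'] ['\'']) ['['] ['(']) [']'] [')']) ['{'] ['(']) ['}'] [')'])
      ['<'] []) ['>'] []) ['|'] ['-']) ['#'] []) ['&'] ['a','n','d']) [';'] []) ['\n'] [' '])
      ['\r'] []
    = l.flatMap pvF := by
  simp only [replace_single, List.flatMap_assoc]
  refine List.flatMap_congr fun c _ => ?_
  by_cases h1 : c = '"'; · subst h1; decide
  by_cases h2 : c = '['; · subst h2; decide
  by_cases h3 : c = ']'; · subst h3; decide
  by_cases h4 : c = '{'; · subst h4; decide
  by_cases h5 : c = '}'; · subst h5; decide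
  by_cases h6 : c = '<'; · subst h6; decide
  by_cases h7 : c = '>'; · subst h7; decide
  by_cases h8 : c = '|'; · subst h8; decide
  by_cases h9 : c = '#'; · subst h9; decide
  by_cases h10 : c = '&'; · subst h10; decide
  by_cases h11 : c = ';'; · subst h11; decide
  by_cases h12 : c = '\n'; · subst h12; decide
  by_cases h13 : c = '\r'; · subst h13; decide
  simp [pvF, h1, h2, h3, h4, h5, h6, h7, h8, h9, h10, h11, h12, h13]

theorem getD_eq_pvF (c : Char) :
    (PySem.Dict.mk [('"', ['\'']), ('[', ['(']), (']', [')']), ('{', ['(']), ('}', [')']),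
      ('<', ([] : List Char)), ('>', []), ('|', ['-']), ('#', []), ('&', ['a','n','d']),
      (';', []), ('\n', [' ']), ('\r', [])]).getD c [c] = pvF c := by
  by_cases h1 : c = '"'; · subst h1; decide
  by_cases h2 : c = '['; · subst h2; decide
  by_cases h3 : c = ']'; · subst h3; decide
  by_cases h4 : c = '{'; · subst h4; decide
  by_cases h5 : c = '}'; · subst h5; decide
  by_cases h6 : c = '<'; · subst h6; decide
  by_cases h7 : c = '>'; · subst h7; decide
  by_cases h8 : c = '|'; · subst h8; decide
  by_cases h9 : c = '#'; · subst h9; decide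
  by_cases h10 : c = '&'; · subst h10; decide
  by_cases h11 : c = ';'; · subst h11; decide
  by_cases h12 : c = '\n'; · subst h12; decide
  by_cases h13 : c = '\r'; · subst h13; decide
  simp [PySem.Dict.getD, PySem.Dict.get?, List.find?, pvF,
    beq_eq_false_iff_ne.mpr (Ne.symm h1), beq_eq_false_iff_ne.mpr (Ne.symm h2),
    beq_eq_false_iff_ne.mpr (Ne.symm h3), beq_eq_false_iff_ne.mpr (Ne.symm h4),
    beq_eq_false_iff_ne.mpr (Ne.symm h5), beq_eq_false_iff_ne.mpr (Ne.symm h6),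
    beq_eq_false_iff_ne.mpr (Ne.symm h7), beq_eq_false_iff_ne.mpr (Ne.symm h8),
    beq_eq_false_iff_ne.mpr (Ne.symm h9), beq_eq_false_iff_ne.mpr (Ne.symm h10),
    beq_eq_false_iff_ne.mpr (Ne.symm h11), beq_eq_false_iff_ne.mpr (Ne.symm h12),
    beq_eq_false_iff_ne.mpr (Ne.symm h13),
    h1, h2, h3, h4, h5, h6, h7, h8, h9, h10, h11, h12, h13]

theorem join_nil_flatten (parts : List (List Char)) :
    PySem.Chars.join [] parts = parts.flatten := by
  simp only [PySem.Chars.join]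
  induction parts with
  | nil => simp [List.intercalate]
  | cons p ps ih => cases ps <;> simp_all [List.intercalate, List.intersperse]

theorem sanitize_mermaid_label_spec : Claim_equal_sanitize_mermaid_label := by
  intro text _
  unfold Spec_sanitize_mermaid_label sanitize_mermaid_label sanitize_mermaid_label_alt
  simp only [List.foldl, PySem.List.foldl_append_singleton_eq_map, List.nil_append,
    getD_eq_pvF, join_nil_flatten]
  have hA : (PySem.Str.replace (PySem.Str.replace (PySem.Str.replace (PySem.Str.replace
      (PySem.Str.replace (PySem.Str.replace (PySem.Str.replace (PySem.Str.replace
      (PySem.Str.replace (PySem.Str.replace (PySem.Str.replace (PySem.Str.replace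
      (PySem.Str.replace text "\"" "'") "[" "(") "]" ")") "{" "(") "}" ")")
      "<" "") ">" "") "|" "-") "#" "") "&" "and") ";" "") "\n" " ") "\r" "").toList
      = text.toList.flatMap pvF := by
    simp only [PySem.Str.replace, String.toList_ofList]
    exact chain_eq text.toList
  rw [show (PySem.Str.replace (PySem.Str.replace (PySem.Str.replace (PySem.Str.replace
      (PySem.Str.replace (PySem.Str.replace (PySem.Str.replace (PySem.Str.replace
      (PySem.Str.replace (PySem.Str.replace (PySem.Str.replace (PySem.Str.replace
      (PySem.Str.replace text "\"" "'") "[" "(") "]" ")") "{" "(") "}" ")")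
      "<" "") ">" "") "|" "-") "#" "") "&" "and") ";" "") "\n" " ") "\r" "")
      = String.ofList (text.toList.flatMap pvF) from by
        rw [← hA, String.ofList_toList]]
  simp [List.flatMap_def]
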